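-- pv_equiv track=rewrite | github.com/Fafer77/AI | SI/lista3/zad1.py | revise_row
-- ===== SOURCE A (Python) =====
-- def revise_row(patterns, domain, n, idx):
--     new_patterns = [
--         pattern for pattern in patterns
--         if all(
--             not ((domain[idx][i] == '1' and pattern[i] == '0') or
--                  domain[idx][i] == '0' and pattern[i] == '1')
--                  for i in range(n)
--         )
--     ]
--     return new_patterns
-- ===== SOURCE B (Python) =====
-- def revise_row(patterns, domain, n, idx):
--     if not patterns or n <= 0:
--         return list(patterns)
--     row = domain[idx]
--     remaining = patterns
--     for i in range(n):
--         c = row[i]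
--         if c == '1':
--             remaining = [p for p in remaining if p[i] != '0']
--         elif c == '0':
--             remaining = [p for p in remaining if p[i] != '1']
--     return list(remaining)
-- ===== Notes on version B (the rewrite author's own statement) =====
-- stated objective: alternative
-- what changed: B transposes the loops: it walks the mask positions once and successively narrows a shrinking candidate list with one filtering pass per constrained position (AC-3-style revise), instead of A re-evaluating the full compound mask condition at every index for every pattern.
-- outside the precondition, e.g. on revise_row([['0', '0']], [['1', '0']], 3, 0): A returns [], B raises IndexError; on revise_row([['a']], [['x', 'x']], 2, 0): A returns [['a']], B returns [['a']]; on revise_row([['0']], [['1', '0']], 2, 0): A returns [], B returns []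
import Mathlib
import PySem

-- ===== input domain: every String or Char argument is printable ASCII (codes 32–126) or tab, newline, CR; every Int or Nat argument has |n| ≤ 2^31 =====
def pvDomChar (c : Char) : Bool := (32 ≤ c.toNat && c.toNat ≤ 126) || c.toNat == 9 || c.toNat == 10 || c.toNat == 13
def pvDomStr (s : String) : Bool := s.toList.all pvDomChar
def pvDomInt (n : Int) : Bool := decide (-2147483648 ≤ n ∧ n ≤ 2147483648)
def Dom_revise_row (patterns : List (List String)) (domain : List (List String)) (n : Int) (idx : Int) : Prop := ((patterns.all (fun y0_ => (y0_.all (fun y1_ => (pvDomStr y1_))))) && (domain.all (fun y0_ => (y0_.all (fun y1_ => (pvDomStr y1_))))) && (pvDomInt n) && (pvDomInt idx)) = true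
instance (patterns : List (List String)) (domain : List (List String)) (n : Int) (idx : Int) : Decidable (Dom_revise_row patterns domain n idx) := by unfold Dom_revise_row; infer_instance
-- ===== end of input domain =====

-- B transposes the loops: one filtering pass of the shrinking candidate list per constrained
-- mask position, instead of A's per-pattern full-mask all() check (objective: alternative).

-- ===== PORT A =====
def revise_row (patterns : List (List String)) (domain : List (List String)) (n : Int) (idx : Int) : List (List String) :=
  patterns.filter (fun pattern =>
    (PySem.List.pyRange 0 n 1).all (fun i =>
      !(((PySem.List.pyGetD (PySem.List.pyGetD domain idx []) i "" == "1") &&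
         (PySem.List.pyGetD pattern i "" == "0")) ||
        ((PySem.List.pyGetD (PySem.List.pyGetD domain idx []) i "" == "0") &&
         (PySem.List.pyGetD pattern i "" == "1")))))

-- ===== PORT B =====
-- the body of B's 'for i in range(n)' loop: one narrowing step per mask position
def pvStep (row : List String) (rem : List (List String)) (i : Int) : List (List String) :=
  let c := PySem.List.pyGetD row i ""
  if c == "1" then rem.filter (fun p => !(PySem.List.pyGetD p i "" == "0"))
  else if c == "0" then rem.filter (fun p => !(PySem.List.pyGetD p i "" == "1"))
  else rem

def revise_row_alt (patterns : List (List String)) (domain : List (List String)) (n : Int) (idx : Int) : List (List String) :=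
  if patterns = [] ∨ n ≤ 0 then patterns
  else (PySem.List.pyRange 0 n 1).foldl (pvStep (PySem.List.pyGetD domain idx [])) patterns

-- ===== PRECONDITION & SPEC =====
-- Pre_ excludes inputs whose full n-index scan can index past the row's or a pattern's end:
-- there A usually raises IndexError, and where it still returns (a disqualifying position reached
-- before the overrun, or mask characters other than '0'/'1' at the missing indices) the reach of
-- the scan is an artefact of all()'s short-circuit evaluation order.
def Pre_revise_row (patterns : List (List String)) (domain : List (List String)) (n : Int) (idx : Int) : Prop :=
  patterns = [] ∨ n ≤ 0 ∨
    ((PySem.List.pyGet? domain idx).any (fun row =>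
        decide (n ≤ (row.length : Int)) &&
        patterns.all (fun p => decide (n ≤ (p.length : Int)))) = true)
instance (patterns : List (List String)) (domain : List (List String)) (n : Int) (idx : Int) : Decidable (Pre_revise_row patterns domain n idx) := by unfold Pre_revise_row; infer_instance
def pvWitness_revise_row : List (List String) × List (List String) × Int × Int :=
  ([["1", "0"], ["0", "0"], ["?", "1"]], [["1", "x"]], 2, 0)
def Spec_revise_row (patterns : List (List String)) (domain : List (List String)) (n : Int) (idx : Int) (out : List (List String)) : Prop := out = revise_row_alt patterns domain n idx
instance (patterns : List (List String)) (domain : List (List String)) (n : Int) (idx : Int) (out : List (List String)) : Decidable (Spec_revise_row patterns domain n idx out) := by unfold Spec_revise_row; infer_instance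

-- ===== CLAIM (what is proved, stated in full; the proofs are below) =====
def Claim_equal_revise_row : Prop := ∀ (patterns : List (List String)) (domain : List (List String)) (n : Int) (idx : Int), Dom_revise_row patterns domain n idx → Pre_revise_row patterns domain n idx → Spec_revise_row patterns domain n idx (revise_row patterns domain n idx)

-- ===== LEMMAS AND PROOFS =====

-- A's per-index keep condition, with the row already looked up
def pvPredA (row : List String) (i : Int) (p : List String) : Bool :=
  !(((PySem.List.pyGetD row i "" == "1") && (PySem.List.pyGetD p i "" == "0")) ||
    ((PySem.List.pyGetD row i "" == "0") && (PySem.List.pyGetD p i "" == "1")))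

theorem pvStep_eq_filter (row : List String) (rem : List (List String)) (i : Int) :
    pvStep row rem i = rem.filter (pvPredA row i) := by
  unfold pvStep pvPredA
  by_cases h1 : PySem.List.pyGetD row i "" = "1"
  · simp [h1]
  · by_cases h0 : PySem.List.pyGetD row i "" = "0"
    · simp [h0]
    · have h1' : (PySem.List.pyGetD row i "" == "1") = false := by simpa using h1
      have h0' : (PySem.List.pyGetD row i "" == "0") = false := by simpa using h0
      simp [h1', h0']

theorem pvFold_eq_filter (row : List String) :
    ∀ (is_ : List Int) (acc : List (List String)),
      is_.foldl (pvStep row) acc = acc.filter (fun p => is_.all (fun i => pvPredA row i p)) := by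
  intro is_
  induction is_ with
  | nil => intro acc; simp
  | cons i is_ ih =>
    intro acc
    rw [List.foldl_cons, ih, pvStep_eq_filter, List.filter_filter]
    apply List.filter_congr
    intro p _
    simp [Bool.and_comm]

theorem revise_row_spec : Claim_equal_revise_row := by
  intro patterns domain n idx _ _
  unfold Spec_revise_row revise_row revise_row_alt
  by_cases hg : patterns = [] ∨ n ≤ 0
  · rw [if_pos hg]
    rcases hg with rfl | hn
    · simp
    · rw [PySem.List.pyRange_one_eq_nil hn]
      simp
  · rw [if_neg hg, pvFold_eq_filter]
    apply List.filter_congr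
    intro p _
    rfl
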